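-- pv_equiv track=rewrite | github.com/CoachEd/advent-of-code | 2021/day15/part2.py | bump_up_array
-- ===== SOURCE A (Python) =====
-- from copy import copy, deepcopy
--
-- def bump_up_array(a,n):
--   a2 = deepcopy(a)
--   for y in range(len(a)):
--     for x in range(len(a[y])):
--       r = a[y][x]
--       for i in range(n):
--         r = r + 1
--         if r == 10:
--           r = 1
--       a2[y][x] = r
--   return a2
-- ===== SOURCE B (Python) =====
-- def bump_up_array(a, n):
--   # Iterate the increment-with-wrap step, but detect the first repeated value
--   # and jump over whole cycles modularly instead of stepping n times per cell.
--   def step(r):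
--     return 1 if r + 1 == 10 else r + 1
--   def bump(v):
--     seen = {}
--     t, k = v, 0
--     while k < n and t not in seen:
--       seen[t] = k
--       t = step(t)
--       k += 1
--     if k < n:
--       cycle = k - seen[t]
--       for _ in range((n - k) % cycle):
--         t = step(t)
--     return t
--   return [[bump(v) for v in row] for row in a]
-- ===== Notes on version B (the rewrite author's own statement) =====
-- stated objective: faster
-- what changed: replaces the blind n-step inner loop per cell by cycle detection: step until the first repeated value is seen (a memo dict of visited values), then jump over the remaining steps with one modular reduction on the cycle length
import Mathlib
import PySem

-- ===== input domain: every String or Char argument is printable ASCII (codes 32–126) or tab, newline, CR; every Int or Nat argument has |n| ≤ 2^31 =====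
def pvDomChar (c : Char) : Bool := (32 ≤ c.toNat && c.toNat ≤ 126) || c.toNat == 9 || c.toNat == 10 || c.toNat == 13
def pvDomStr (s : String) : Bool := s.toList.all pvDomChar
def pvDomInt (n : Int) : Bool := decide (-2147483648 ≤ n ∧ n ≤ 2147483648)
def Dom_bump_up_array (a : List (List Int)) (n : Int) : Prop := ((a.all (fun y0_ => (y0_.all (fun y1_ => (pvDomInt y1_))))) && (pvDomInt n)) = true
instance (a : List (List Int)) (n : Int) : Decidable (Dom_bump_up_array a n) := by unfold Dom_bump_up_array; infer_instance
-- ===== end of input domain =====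

-- B replaces A's blind n-step inner loop per cell by cycle detection with a memo of seen
-- values and one modular jump over the remaining whole cycles (objective: faster in n).

-- ===== PORT A =====
-- literal port of A: deepcopy, then nested index loops; the innermost loop does n single increments with wrap at 10
def bump_up_array (a : List (List Int)) (n : Int) : List (List Int) :=
  let a2 := a
  (PySem.List.pyRange 0 (a.length : Int) 1).foldl (fun a2 y =>
    ((PySem.List.pyRange 0 (((PySem.List.pyGetD a y []).length : Nat) : Int) 1).foldl (fun a2 x =>
      let r := PySem.List.pyGetD (PySem.List.pyGetD a y []) x 0
      let r := (PySem.List.pyRange 0 n 1).foldl (fun r _ =>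
        let r := r + 1
        if r = 10 then 1 else r) r
      a2.set y.toNat ((PySem.List.pyGetD a2 y []).set x.toNat r)) a2)) a2

-- ===== PORT B =====
-- Source B's step(r)
def pvStepB (r : Int) : Int := if r + 1 = 10 then 1 else r + 1

-- Source B's while loop: 'while k < n and t not in seen: seen[t] = k; t = step(t); k += 1'.
-- Fuel n.toNat is exact: k increases by 1 each iteration from 0 and the guard requires k < n.
def pvLoopB (n : Int) : Nat → Int → Int → PySem.Dict Int Int → Int × Int × PySem.Dict Int Int
  | 0, t, k, seen => (t, k, seen)
  | fuel+1, t, k, seen =>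
      if k < n ∧ (PySem.Dict.get? seen t) = none then
        pvLoopB n fuel (pvStepB t) (k + 1) (PySem.Dict.insert seen t k)
      else (t, k, seen)

-- Source B's bump(v); 'seen[t]' is ported as getD (the key is present whenever it is read),
-- and 'range((n - k) % cycle)' as List.range of the toNat (the bound is nonnegative there).
def pvBumpB (n v : Int) : Int :=
  let r := pvLoopB n n.toNat v 0 PySem.Dict.empty
  let t := r.1
  let k := r.2.1
  let seen := r.2.2
  if k < n then
    let cycle := k - PySem.Dict.getD seen t 0
    (List.range ((PySem.Int.mod (n - k) cycle).toNat)).foldl (fun t _ => pvStepB t) t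
  else t

-- literal port of B: nested comprehension applying bump to every cell
def bump_up_array_alt (a : List (List Int)) (n : Int) : List (List Int) :=
  a.map (fun row => row.map (fun v => pvBumpB n v))

-- ===== PRECONDITION & SPEC =====
def Spec_bump_up_array (a : List (List Int)) (n : Int) (out : List (List Int)) : Prop := out = bump_up_array_alt a n
instance (a : List (List Int)) (n : Int) (out : List (List Int)) : Decidable (Spec_bump_up_array a n out) := by unfold Spec_bump_up_array; infer_instance

-- ===== CLAIM (what is proved, stated in full; the proofs are below) =====
def Claim_equal_bump_up_array : Prop := ∀ (a : List (List Int)) (n : Int), Dom_bump_up_array a n → Spec_bump_up_array a n (bump_up_array a n)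

-- ===== LEMMAS AND PROOFS =====

-- folding the step over a range is iterating it
lemma pv_foldl_range_iterate (f : Int → Int) : ∀ (m : ℕ) (v : Int),
    (List.range m).foldl (fun r _ => f r) v = f^[m] v := by
  intro m
  induction m with
  | zero => intro v; simp
  | succ k ih =>
    intro v
    rw [List.range_succ, List.foldl_append, ih]
    simp [Function.iterate_succ_apply']

-- once a point returns to itself after c steps, whole multiples of c can be skipped
lemma pv_iter_period (f : Int → Int) (p : Int) (c : ℕ) (hc : f^[c] p = p) :
    ∀ (q r : ℕ), f^[q * c + r] p = f^[r] p := by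
  intro q
  induction q with
  | zero => intro r; simp
  | succ j ih =>
    intro r
    have h : (j + 1) * c + r = c + (j * c + r) := by ring
    rw [h, Function.iterate_add_apply, ih, ← Function.iterate_add_apply,
      Nat.add_comm, Function.iterate_add_apply, hc]

-- invariant of Source B's while loop: seen maps exactly the first k trajectory values to their indices
def pvSeenInv (v : Int) (k : ℕ) (seen : PySem.Dict Int Int) : Prop :=
  (∀ jn : ℕ, jn < k → seen.get? (pvStepB^[jn] v) = some (jn : Int)) ∧
  (∀ x j, seen.get? x = some j → ∃ jn : ℕ, jn < k ∧ x = pvStepB^[jn] v ∧ j = (jn : Int))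

-- the loop followed by the modular jump computes the n-fold iterate
lemma pv_loop_correct (n v : Int) : ∀ (fuel k : ℕ) (seen : PySem.Dict Int Int),
    ((k : Int) + fuel = n) → pvSeenInv v k seen →
    (let r := pvLoopB n fuel (pvStepB^[k] v) (k : Int) seen
     if r.2.1 < n then
       (List.range ((PySem.Int.mod (n - r.2.1) (r.2.1 - PySem.Dict.getD r.2.2 r.1 0)).toNat)).foldl
         (fun t _ => pvStepB t) r.1
     else r.1) = pvStepB^[n.toNat] v := by
  intro fuel
  induction fuel with
  | zero =>
    intro k seen hk _
    have hkn : (k : Int) = n := by omega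
    have hN : n.toNat = k := by omega
    simp [pvLoopB, hkn, hN]
  | succ fl ih =>
    intro k seen hk hinv
    have hklt : (k : Int) < n := by omega
    cases hget : PySem.Dict.get? seen (pvStepB^[k] v) with
    | none =>
      have hrec := ih (k + 1) (PySem.Dict.insert seen (pvStepB^[k] v) (k : Int))
        (by push_cast; omega) ?_
      · simp only [pvLoopB, hklt, hget, and_self, if_true]
        have hcast : ((k : Int) + 1) = ((k + 1 : ℕ) : Int) := by push_cast; ring
        rw [hcast, ← Function.iterate_succ_apply' pvStepB k v]
        exact hrec
      · constructor
        · intro jn hjn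
          rcases Nat.lt_succ_iff_lt_or_eq.mp hjn with h | h
          · have hne : pvStepB^[jn] v ≠ pvStepB^[k] v := by
              intro he
              have hj := hinv.1 jn h
              rw [he, hget] at hj
              exact (by simp at hj)
            rw [PySem.Dict.get?_insert_of_ne _ _ hne]
            exact hinv.1 jn h
          · subst h
            exact PySem.Dict.get?_insert_self _ _ _
        · intro x j hx
          rw [PySem.Dict.get?_insert] at hx
          by_cases hxe : x = pvStepB^[k] v
          · rw [if_pos hxe] at hx
            exact ⟨k, Nat.lt_succ_self k, hxe, (Option.some_inj.mp hx).symm⟩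
          · rw [if_neg hxe] at hx
            obtain ⟨jn, hjn, hxeq, hje⟩ := hinv.2 x j hx
            exact ⟨jn, Nat.lt_succ_of_lt hjn, hxeq, hje⟩
    | some j =>
      obtain ⟨jn, hjn, hxeq, hje⟩ := hinv.2 _ j hget
      have hxx : pvStepB^[jn] v = pvStepB^[k] v := hxeq.symm
      have hbranch : ¬ (((k : Int) < n) ∧ (some j : Option Int) = none) := by simp
      simp only [pvLoopB, hget, if_neg hbranch]
      rw [if_pos hklt]
      have hgetD : PySem.Dict.getD seen (pvStepB^[k] v) 0 = (jn : Int) := by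
        rw [PySem.Dict.getD_of_get?_eq_some _ _ hget, hje]
      rw [hgetD]
      -- set up the cycle arithmetic in ℕ
      set c : ℕ := k - jn with hc
      have hcpos : 0 < c := by omega
      have hcInt : ((k : Int) - (jn : Int)) = (c : Int) := by omega
      set N : ℕ := n.toNat with hN
      have hNn : (N : Int) = n := by omega
      have hmodeq : PySem.Int.mod (n - (k : Int)) ((k : Int) - (jn : Int)) =
          (((N - k) % c : ℕ) : Int) := by
        rw [hcInt, PySem.Int.mod_eq_emod_of_pos (show (0:Int) < (c:Int) by exact_mod_cast hcpos)]
        have h1 : n - (k : Int) = ((N - k : ℕ) : Int) := by omega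
        rw [h1]
        push_cast
        rfl
      rw [hmodeq]
      have htn : ((((N - k) % c : ℕ) : Int)).toNat = (N - k) % c := by
        exact Int.toNat_natCast _
      rw [htn, pv_foldl_range_iterate, ← Function.iterate_add_apply]
      -- p := the entry point of the cycle
      have hcyc : pvStepB^[c] (pvStepB^[jn] v) = pvStepB^[jn] v := by
        rw [← Function.iterate_add_apply]
        have : c + jn = k := by omega
        rw [this, hxx]
      set m : ℕ := (N - k) % c with hm
      have hmlt : m < c := Nat.mod_lt _ hcpos
      have hkN : k < N := by omega
      -- left side: exponent m + k = (1*c + m) + jn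
      have hL : m + k = (1 * c + m) + jn := by omega
      -- right side: exponent N = (((N-k)/c + 1) * c + m) + jn
      have hq := Nat.div_add_mod (N - k) c
      have hR : N = (((N - k) / c + 1) * c + m) + jn := by
        have h1 : ((N - k) / c + 1) * c = c * ((N - k) / c) + c := by ring
        omega
      rw [hL, hR, Function.iterate_add_apply pvStepB (1 * c + m) jn,
        Function.iterate_add_apply pvStepB (((N - k) / c + 1) * c + m) jn,
        pv_iter_period pvStepB _ c hcyc, pv_iter_period pvStepB _ c hcyc]

-- Source B's bump equals n-fold iteration of the step
lemma pv_bump_eq_iterate (n v : Int) : pvBumpB n v = pvStepB^[n.toNat] v := by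
  by_cases hn : n ≤ 0
  · have h0 : n.toNat = 0 := by omega
    have hlt : ¬ ((0 : Int) < n) := by omega
    simp [pvBumpB, pvLoopB, h0, hlt]
  · have h := pv_loop_correct n v n.toNat 0 PySem.Dict.empty (by omega)
      ⟨fun jn hjn => absurd hjn (Nat.not_lt_zero jn),
       fun x j hx => absurd hx (by simp [PySem.Dict.get?_empty])⟩
    simpa [pvBumpB] using h

-- A's inner n-step loop equals Source B's bump
lemma pv_iter_bump (n v : Int) :
    (List.range n.toNat).foldl (fun r _ => if r + 1 = 10 then 1 else r + 1) v = pvBumpB n v := by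
  rw [pv_bump_eq_iterate]
  have := pv_foldl_range_iterate pvStepB n.toNat v
  simpa [pvStepB] using this

-- a fold that repeatedly sets index y (reading back the current row at y) factors into a single set
lemma pv_set_focus {α β : Type} (d : List α) : ∀ (xs : List β) (acc : List (List α)) (y : ℕ)
    (f : β → List α → List α), y < acc.length →
    xs.foldl (fun l x => l.set y (f x (l.getD y d))) acc
      = acc.set y (xs.foldl (fun r x => f x r) (acc.getD y d)) := by
  intro xs
  induction xs with
  | nil =>
    intro acc y f hy
    simp [List.getD_eq_getElem?_getD, List.getElem?_eq_getElem hy, List.set_getElem_self]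
  | cons x xs ih =>
    intro acc y f hy
    simp only [List.foldl_cons]
    rw [ih _ _ _ (by simpa using hy)]
    simp [List.getD_eq_getElem?_getD, List.set_set, hy]

lemma pv_take_set {α : Type} (acc : List α) (k : ℕ) (v : α) (hk : k < acc.length) :
    (acc.set k v).take (k+1) = acc.take k ++ [v] := by
  rw [List.take_add_one]
  congr 1
  · apply List.ext_getElem
    · simp
    · intro i h1 h2
      simp only [List.getElem_take, List.getElem_set]
      rw [if_neg (by simp at h1; omega)]
  · simp [hk]

lemma pv_drop_set {α : Type} (acc : List α) (k m : ℕ) (v : α) (hm : k < m) :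
    (acc.set k v).drop m = acc.drop m := by
  apply List.ext_getElem
  · simp
  · intro i h1 h2
    simp only [List.getElem_drop, List.getElem_set]
    rw [if_neg (by omega)]

-- a fold over range' that sets each index once (value independent of the accumulator)
lemma pv_foldl_set_range {α : Type} (f : ℕ → α) : ∀ (m k : ℕ) (acc : List α), k + m ≤ acc.length →
    (List.range' k m).foldl (fun l i => l.set i (f i)) acc
      = acc.take k ++ (List.range' k m).map f ++ acc.drop (k + m) := by
  intro m
  induction m with
  | zero => intro k acc h; simp [List.take_append_drop]
  | succ j ih =>
    intro k acc h
    rw [List.range'_succ]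
    simp only [List.foldl_cons, List.map_cons]
    rw [ih (k + 1) _ (by simp; omega)]
    have hk : k < acc.length := by omega
    rw [pv_take_set acc k (f k) hk, pv_drop_set acc k (k + 1 + j) (f k) (by omega)]
    have : k + 1 + j = k + (j + 1) := by omega
    rw [this]
    simp

lemma pv_getD_set {α : Type} (l : List (List α)) (i j : ℕ) (v : List α) (hi : i < l.length) :
    ((l.set i v).getD j []) = if j = i then v else l.getD j [] := by
  simp only [List.getD_eq_getElem?_getD, List.getElem?_set]
  by_cases h : i = j
  · subst h
    rw [if_pos rfl, if_pos rfl, if_pos hi]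
    rfl
  · rw [if_neg h, if_neg (fun hji => h hji.symm)]

-- replace a fold body by a single set, under an invariant preserved along the fold
lemma pv_foldl_congr_P {α : Type} (P : List α → Prop) (L : ℕ) (F : ℕ → α)
    (g : List α → ℕ → List α)
    (hg : ∀ l i, P l → i < L → g l i = l.set i (F i))
    (hP : ∀ l i, P l → i < L → P (l.set i (F i))) :
    ∀ (m k : ℕ) (acc : List α), P acc → k + m ≤ L →
    (List.range' k m).foldl g acc = (List.range' k m).foldl (fun l i => l.set i (F i)) acc := by
  intro m
  induction m with
  | zero => intro k acc _ _; simp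
  | succ j ih =>
    intro k acc hacc h
    rw [List.range'_succ]
    simp only [List.foldl_cons]
    rw [hg acc k hacc (by omega)]
    exact ih (k + 1) _ (hP acc k hacc (by omega)) (by omega)

-- ===== VERDICT (by name: the statement is the Claim_ definition above) =====
theorem bump_up_array_spec : Claim_equal_bump_up_array := by
  unfold Claim_equal_bump_up_array Spec_bump_up_array
  intro a n _
  show bump_up_array a n = bump_up_array_alt a n
  unfold bump_up_array bump_up_array_alt
  simp only [PySem.List.pyRange_one, List.foldl_map, zero_add, Int.sub_zero,
    Int.toNat_natCast, PySem.List.pyGetD_natCast]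
  simp only [pv_iter_bump]
  simp only [List.range_eq_range']
  set F : ℕ → List Int := fun i => (a.getD i []).map (pvBumpB n) with hF
  set P : List (List Int) → Prop :=
    fun l => l.length = a.length ∧
      ∀ j, j < a.length → (l.getD j []).length = (a.getD j []).length with hPdef
  have hgetDset : ∀ (l : List (List Int)) (i j : ℕ) (v : List Int), i < l.length →
      ((l.set i v).getD j []) = if j = i then v else l.getD j [] :=
    fun l i j v hi => pv_getD_set l i j v hi
  have hP : ∀ l i, P l → i < a.length → P (l.set i (F i)) := by
    intro l i hl hi
    refine ⟨by simpa using hl.1, ?_⟩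
    intro j hj
    rw [hgetDset l i j _ (by omega)]
    split_ifs with h
    · subst h; simp [hF]
    · exact hl.2 j hj
  have hg : ∀ (l : List (List Int)) (i : ℕ), P l → i < a.length →
      (List.range' 0 (a.getD i []).length).foldl
        (fun x y => x.set i ((x.getD i []).set y (pvBumpB n ((a.getD i []).getD y 0)))) l
        = l.set i (F i) := by
    intro l i hl hi
    rw [pv_set_focus [] (List.range' 0 (a.getD i []).length) l i
        (fun y rc => rc.set y (pvBumpB n ((a.getD i []).getD y 0))) (by omega)]
    congr 1
    rw [pv_foldl_set_range (fun y => pvBumpB n ((a.getD i []).getD y 0))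
        (a.getD i []).length 0 (l.getD i []) (by rw [hl.2 i hi]; omega)]
    rw [hF]
    have hrl : (l.getD i []).length = (a.getD i []).length := hl.2 i hi
    have hdrop : List.drop (0 + (a.getD i []).length) (l.getD i []) = [] :=
      List.drop_eq_nil_of_le (by omega)
    rw [hdrop, List.take_zero]
    simp only [List.nil_append, List.append_nil]
    apply List.ext_getElem
    · simp
    · intro j h1 h2
      have hj : j < (a.getD i []).length := by simpa using h2
      simp only [List.getElem_map, List.getElem_range', zero_add, one_mul]
      congr 1
      rw [List.getD_eq_getElem?_getD, List.getElem?_eq_getElem hj]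
      rfl
  rw [pv_foldl_congr_P P a.length F _ hg hP a.length 0 a
      ⟨rfl, fun j _ => rfl⟩ (by omega)]
  rw [pv_foldl_set_range F a.length 0 a (by omega)]
  rw [show List.drop (0 + a.length) a = [] from List.drop_eq_nil_of_le (by omega),
    List.take_zero]
  simp only [List.nil_append, List.append_nil]
  apply List.ext_getElem
  · simp
  · intro i h1 h2
    have hi : i < a.length := by simpa using h2
    simp only [List.getElem_map, List.getElem_range', zero_add, one_mul]
    rw [hF]
    simp only [List.getD_eq_getElem?_getD, List.getElem?_eq_getElem hi]
    rfl
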